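-- pv_equiv track=rewrite | github.com/miliar/Code_Jam_Webscraper | Solutions_python/Problem_155/3509.py | calcInvitees
-- ===== SOURCE A (Python) =====
-- def calcInvitees(standing, audience, shyness):
-- 	if len(audience) == 1:
-- 		return 0
-- 	standing += audience[0]
-- 	shyness += 1
-- 	if standing >= shyness:
-- 		return calcInvitees(standing, audience[1:], shyness)
-- 	return (shyness - standing) + calcInvitees(shyness, audience[1:], shyness)
-- ===== SOURCE B (Python) =====
-- def calcInvitees(standing, audience, shyness):
--     # max prefix-deficit formulation: answer = max(0, max_k ((shyness+k) - (standing + sum of first k)))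
--     deficit = shyness - standing
--     best = 0
--     for x in audience[:-1]:
--         deficit += 1 - x
--         if deficit > best:
--             best = deficit
--     return best
-- ===== Notes on version B (the rewrite author's own statement) =====
-- stated objective: faster
-- what changed: Replaces the list-slicing recursion that patches 'standing' up to 'shyness' at each deficit with a single linear pass computing the maximum prefix deficit (answer = max(0, max_k (shyness+k - standing - prefix_sum_k))).
import Mathlib
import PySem

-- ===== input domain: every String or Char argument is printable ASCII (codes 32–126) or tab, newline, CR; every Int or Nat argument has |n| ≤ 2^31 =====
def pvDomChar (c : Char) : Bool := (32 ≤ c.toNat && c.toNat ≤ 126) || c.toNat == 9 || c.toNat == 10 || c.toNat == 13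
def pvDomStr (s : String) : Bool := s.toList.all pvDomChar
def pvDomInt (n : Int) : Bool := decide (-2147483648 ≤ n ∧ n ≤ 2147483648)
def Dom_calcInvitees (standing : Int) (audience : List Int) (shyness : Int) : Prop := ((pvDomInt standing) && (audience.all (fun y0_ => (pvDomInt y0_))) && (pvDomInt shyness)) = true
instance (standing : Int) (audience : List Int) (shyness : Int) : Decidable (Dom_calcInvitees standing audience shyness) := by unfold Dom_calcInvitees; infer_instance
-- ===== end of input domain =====

-- B replaces A's list-slicing recursion with one linear pass over the list computing
-- the maximum prefix deficit (a different algorithm; measurably faster, O(n) vs O(n^2)).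
-- ===== PORT A =====
def calcInvitees (standing : Int) (audience : List Int) (shyness : Int) : Int :=
  if audience.length = 1 then 0
  else
    match audience with
    | [] => 0  -- Python raises IndexError here (audience[0]); excluded by Pre_
    | a :: rest =>
      let standing' := standing + a
      let shyness' := shyness + 1
      if standing' ≥ shyness' then calcInvitees standing' rest shyness'
      else (shyness' - standing') + calcInvitees shyness' rest shyness'

-- ===== PORT B =====
-- the loop body of Source B's for-loop (deficit, best accumulators)
def pvStepB (st : Int × Int) (x : Int) : Int × Int :=
  let d := st.1 + (1 - x)
  (d, if d > st.2 then d else st.2)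

def calcInvitees_alt (standing : Int) (audience : List Int) (shyness : Int) : Int :=
  (audience.dropLast.foldl pvStepB (shyness - standing, 0)).2

-- ===== PRECONDITION & SPEC =====
-- Pre_ excludes exactly the empty audience, on which Python A raises IndexError.
def Pre_calcInvitees (standing : Int) (audience : List Int) (shyness : Int) : Prop := audience ≠ []
instance (standing : Int) (audience : List Int) (shyness : Int) : Decidable (Pre_calcInvitees standing audience shyness) := by unfold Pre_calcInvitees; infer_instance
def pvWitness_calcInvitees : Int × List Int × Int := (1, [2, 3, 0, 1], 0)


def Spec_calcInvitees (standing : Int) (audience : List Int) (shyness : Int) (out : Int) : Prop := out = calcInvitees_alt standing audience shyness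
instance (standing : Int) (audience : List Int) (shyness : Int) (out : Int) : Decidable (Spec_calcInvitees standing audience shyness out) := by unfold Spec_calcInvitees; infer_instance

-- ===== CLAIM (what is proved, stated in full; the proofs are below) =====
def Claim_equal_calcInvitees : Prop := ∀ (standing : Int) (audience : List Int) (shyness : Int), Dom_calcInvitees standing audience shyness → Pre_calcInvitees standing audience shyness → Spec_calcInvitees standing audience shyness (calcInvitees standing audience shyness)

-- ===== LEMMAS AND PROOFS =====

-- shifting both accumulators of B's fold by a constant shifts both results by it
theorem pvStepB_shift (l : List Int) (d b c : Int) :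
    l.foldl pvStepB (d + c, b + c) =
      ((l.foldl pvStepB (d, b)).1 + c, (l.foldl pvStepB (d, b)).2 + c) := by
  induction l generalizing d b with
  | nil => rfl
  | cons x xs ih =>
    simp only [List.foldl_cons]
    have h1 : pvStepB (d + c, b + c) x =
        ((pvStepB (d, b) x).1 + c, (pvStepB (d, b) x).2 + c) := by
      simp only [pvStepB]
      by_cases h : d + (1 - x) > b
      · rw [if_pos (by omega), if_pos h]
        exact Prod.ext (by ring) (by ring)
      · rw [if_neg (by omega), if_neg h]
        exact Prod.ext (by ring) rfl
    rw [h1, ← ih]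

theorem calcInvitees_eq_alt (l : List Int) :
    ∀ (s t : Int), l ≠ [] → calcInvitees s l t = calcInvitees_alt s l t := by
  induction l with
  | nil => intro s t h; exact absurd rfl h
  | cons x rest ih =>
    intro s t _
    match rest with
    | [] => simp [calcInvitees, calcInvitees_alt]
    | y :: rest' =>
      have hlen : (x :: y :: rest').length ≠ 1 := by simp
      have hdrop : (x :: y :: rest').dropLast = x :: (y :: rest').dropLast := rfl
      rw [calcInvitees]
      rw [if_neg hlen]
      simp only []
      by_cases hge : s + x ≥ t + 1
      · rw [if_pos hge, ih (s + x) (t + 1) (by simp)]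
        simp only [calcInvitees_alt, hdrop, List.foldl_cons, pvStepB]
        have h2 : ¬ (t - s + (1 - x) > (0 : Int)) := by omega
        rw [if_neg h2]
        have : t - s + (1 - x) = t + 1 - (s + x) := by ring
        rw [this]
      · rw [if_neg hge, ih (t + 1) (t + 1) (by simp)]
        simp only [calcInvitees_alt, hdrop, List.foldl_cons, pvStepB]
        have h2 : t - s + (1 - x) > (0 : Int) := by omega
        rw [if_pos h2]
        -- B's state after the first element is the base state shifted by the deficit c
        set c : Int := t - s + (1 - x) with hc
        have hbase : (c, c) = ((t + 1 - (t + 1)) + c, (0 : Int) + c) := by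
          refine Prod.ext ?_ ?_ <;> simp
        rw [hbase, pvStepB_shift]
        omega

-- ===== VERDICT (by name: the statement is the Claim_ definition above) =====
theorem calcInvitees_spec : Claim_equal_calcInvitees := by
  intro s l t _ hpre
  unfold Spec_calcInvitees
  exact calcInvitees_eq_alt l s t hpre
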